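-- pv_equiv track=rewrite | github.com/vaccineskill/orgonite-site | scripts/reformat-articles.py | clean_stray_fragments
-- ===== SOURCE A (Python) =====
-- def clean_stray_fragments(lines: list[str]) -> list[str]:
--     """Remove lines that are clearly multi-column PDF artifacts (very short fragments)."""
--     result = []
--     for i, line in enumerate(lines):
--         stripped = line.strip()
--         # Skip isolated 1-3 word fragments that aren't headings
--         if stripped and len(stripped.split()) <= 2 and not stripped.startswith('#'):
--             # If surrounded by blank lines and looks like a fragment
--             prev_blank = (i == 0) or (lines[i - 1].strip() == "")
--             next_blank = (i == len(lines) - 1) or (lines[i + 1].strip() == "")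
--             # Check if it ends mid-word (no punctuation at all)
--             if prev_blank and next_blank and not any(c in stripped for c in '.!?:;,\'"()'):
--                 # Skip isolated micro-fragments like "tive energy" or "r:a"
--                 if len(stripped) < 20 and not stripped[0].isupper():
--                     continue
--         result.append(line)
--     return result
-- ===== SOURCE B (Python) =====
-- def clean_stray_fragments(lines: list[str]) -> list[str]:
--     """Remove lines that are clearly multi-column PDF artifacts (very short fragments).
--
--     Run-based decomposition: split into maximal runs of non-blank lines separated by
--     blank lines; a run is dropped only when it is a single line passing the fragment test.
--     """
--     def _is_fragment(line):
--         s = line.strip()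
--         return (bool(s) and len(s.split()) <= 2 and not s.startswith('#')
--                 and not any(c in s for c in '.!?:;,\'"()')
--                 and len(s) < 20 and not s[0].isupper())
--
--     def _flush(run):
--         return [] if len(run) == 1 and _is_fragment(run[0]) else run
--
--     out = []
--     run = []
--     for line in lines:
--         if line.strip() == "":
--             out.extend(_flush(run))
--             run = []
--             out.append(line)
--         else:
--             run.append(line)
--     out.extend(_flush(run))
--     return out
-- ===== Notes on version B (the rewrite author's own statement) =====
-- stated objective: alternative
-- what changed: A scans by index and re-reads and re-strips lines[i-1]/lines[i+1] each step to test isolation; B instead splits the input into blank-separated runs in one accumulator pass and drops exactly the singleton runs that pass the fragment test, with no index arithmetic or neighbor lookups.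
import Mathlib
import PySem

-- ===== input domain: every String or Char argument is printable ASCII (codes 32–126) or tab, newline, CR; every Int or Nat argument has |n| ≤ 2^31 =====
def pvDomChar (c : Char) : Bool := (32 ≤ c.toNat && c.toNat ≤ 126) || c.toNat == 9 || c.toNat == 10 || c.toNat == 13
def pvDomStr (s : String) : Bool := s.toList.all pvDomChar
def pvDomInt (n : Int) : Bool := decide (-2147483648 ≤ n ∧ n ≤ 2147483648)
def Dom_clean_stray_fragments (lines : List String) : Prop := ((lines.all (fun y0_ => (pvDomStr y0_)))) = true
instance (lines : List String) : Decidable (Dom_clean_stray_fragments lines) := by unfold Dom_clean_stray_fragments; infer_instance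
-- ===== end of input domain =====

-- B replaces A's index-based neighbor lookups by a run-splitting pass (blank-separated runs;
-- only singleton fragment runs are dropped): an alternative decomposition of the same filter.


-- ===== PORT A =====
-- loop body of A (named so the proofs can speak about one step); `lines` is the full list A indexes into
def pvStepA (lines : List String) (result : List String) (p : Int × String) : List String :=
  let i := p.1
  let line := p.2
  let stripped := PySem.Str.strip line
  if stripped != "" && decide ((PySem.Str.split₀ stripped).length ≤ 2)
      && !(PySem.Str.startswith stripped "#") then
    let prev_blank := (i == 0) || (PySem.Str.strip ((PySem.List.pyGet? lines (i - 1)).getD "") == "")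
    let next_blank := (i == (lines.length : Int) - 1) || (PySem.Str.strip ((PySem.List.pyGet? lines (i + 1)).getD "") == "")
    if prev_blank && next_blank
        && !(".!?:;,'\"()".toList.any (fun c => PySem.Str.isIn (String.ofList [c]) stripped)) then
      -- stripped[0] is guarded by stripped != "" above, so the index is always in range
      if decide (PySem.Str.len stripped < 20)
          && !(((PySem.Str.pyGet? stripped 0).map PySem.Chars.isupper).getD false) then
        result  -- continue
      else result ++ [line]
    else result ++ [line]
  else result ++ [line]

def clean_stray_fragments (lines : List String) : List String :=
  (PySem.List.enumerate lines).foldl (pvStepA lines) []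

-- ===== PORT B =====
-- the fragment test of Source B's _is_fragment
def pvFrag (line : String) : Bool :=
  let s := PySem.Str.strip line
  s != "" && decide ((PySem.Str.split₀ s).length ≤ 2) && !(PySem.Str.startswith s "#")
    && !(".!?:;,'\"()".toList.any (fun c => PySem.Str.isIn (String.ofList [c]) s))
    && decide (PySem.Str.len s < 20)
    && !(((PySem.Str.pyGet? s 0).map PySem.Chars.isupper).getD false)

-- Source B's _flush: a run survives unless it is a single fragment line
def pvFlush (run : List String) : List String :=
  match run with
  | [l] => if pvFrag l then [] else [l]
  | _ => run

-- Source B's main loop: accumulate the current non-blank run, flush at blank lines and at the end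
def pvGo : List String → List String → List String
  | run, [] => pvFlush run
  | run, l :: rest =>
      if PySem.Str.strip l == "" then pvFlush run ++ l :: pvGo [] rest
      else pvGo (run ++ [l]) rest

def clean_stray_fragments_alt (lines : List String) : List String := pvGo [] lines

-- ===== PRECONDITION & SPEC =====
def Spec_clean_stray_fragments (lines : List String) (out : List String) : Prop := out = clean_stray_fragments_alt lines
instance (lines : List String) (out : List String) : Decidable (Spec_clean_stray_fragments lines out) := by unfold Spec_clean_stray_fragments; infer_instance

-- ===== CLAIM (what is proved, stated in full; the proofs are below) =====
def Claim_equal_clean_stray_fragments : Prop := ∀ (lines : List String), Dom_clean_stray_fragments lines → Spec_clean_stray_fragments lines (clean_stray_fragments lines)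

-- ===== LEMMAS AND PROOFS =====

-- "next line is blank or absent", A's next_blank seen from the suffix after the current line
def pvNb : List String → Bool
  | [] => true
  | r :: _ => PySem.Str.strip r == ""

-- "previous line is blank or absent", A's prev_blank seen from the prefix before the current line
def pvPb (pre : List String) : Bool :=
  match pre.getLast? with
  | none => true
  | some q => PySem.Str.strip q == ""

-- common reference function: one pass with the previous-line-blank flag
def pvS : Bool → List String → List String
  | _, [] => []
  | pb, l :: rest =>
      (if pb && pvFrag l && pvNb rest then [] else [l]) ++ pvS (PySem.Str.strip l == "") rest

theorem pvFrag_of_blank (l : String) (h : PySem.Str.strip l = "") : pvFrag l = false := by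
  simp [pvFrag, h]

theorem pvPb_concat (pre : List String) (l : String) :
    pvPb (pre ++ [l]) = (PySem.Str.strip l == "") := by
  simp [pvPb]

theorem pvBoolCase {α : Type} (acc : List α) (l : α) (b1 b2 b3 b4 b5 b6 pb nb : Bool) :
    (if b1 && b2 && b3 then
       if pb && nb && b4 then
         if b5 && b6 then acc else acc ++ [l]
       else acc ++ [l]
     else acc ++ [l])
    = acc ++ (if pb && (b1 && b2 && b3 && b4 && b5 && b6) && nb then [] else [l]) := by
  cases b1 <;> cases b2 <;> cases b3 <;> cases b4 <;> cases b5 <;> cases b6 <;> cases pb <;> cases nb <;> simp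

theorem pvStepA_eq (pre : List String) (l : String) (rest : List String) (acc : List String) :
    pvStepA (pre ++ l :: rest) acc ((pre.length : Int), l)
      = acc ++ (if pvPb pre && pvFrag l && pvNb rest then [] else [l]) := by
  have hprev : (((pre.length : Int) == 0)
      || (PySem.Str.strip ((PySem.List.pyGet? (pre ++ l :: rest) ((pre.length : Int) - 1)).getD "") == ""))
      = pvPb pre := by
    cases hpre : pre.getLast? with
    | none =>
      have : pre = [] := List.getLast?_eq_none_iff.mp hpre
      subst this
      simp [pvPb, hpre]
    | some q =>
      have hne : pre ≠ [] := by
        intro h; subst h; simp at hpre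
      have hlen : 0 < pre.length := List.length_pos_iff.mpr hne
      have hcast : ((pre.length : Int) - 1) = ((pre.length - 1 : Nat) : Int) := by omega
      have hget : (pre ++ l :: rest)[pre.length - 1]? = some q := by
        rw [List.getElem?_append_left (by omega)]
        rw [← List.getLast?_eq_getElem?, hpre]
      have h0 : ((pre.length : Int) == 0) = false := by
        simp; omega
      rw [h0, hcast, PySem.List.pyGet?_natCast, hget]
      simp [pvPb, hpre]
  have hnext : (((pre.length : Int) == ((pre ++ l :: rest).length : Int) - 1)
      || (PySem.Str.strip ((PySem.List.pyGet? (pre ++ l :: rest) ((pre.length : Int) + 1)).getD "") == ""))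
      = pvNb rest := by
    cases rest with
    | nil =>
      have : ((pre.length : Int) == ((pre ++ [l]).length : Int) - 1) = true := by
        simp
      rw [this]
      simp [pvNb]
    | cons r t =>
      have h0 : ((pre.length : Int) == ((pre ++ l :: r :: t).length : Int) - 1) = false := by
        simp; omega
      have hcast : ((pre.length : Int) + 1) = ((pre.length + 1 : Nat) : Int) := by omega
      have hget : (pre ++ l :: r :: t)[pre.length + 1]? = some r := by
        rw [List.getElem?_append_right (by omega)]
        simp
      rw [h0, hcast, PySem.List.pyGet?_natCast, hget]
      simp [pvNb]
  simp only [pvStepA, pvFrag, hprev, hnext]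
  exact pvBoolCase acc l _ _ _ _ _ _ _ _

theorem pvA_fold (suf : List String) : ∀ (pre acc : List String),
    (PySem.List.enumerate suf (pre.length : Int)).foldl (pvStepA (pre ++ suf)) acc
      = acc ++ pvS (pvPb pre) suf := by
  induction suf with
  | nil => intro pre acc; simp [PySem.List.enumerate, pvS]
  | cons l rest ih =>
    intro pre acc
    rw [PySem.List.enumerate_cons, List.foldl_cons]
    have hlen : ((pre.length : Int) + 1) = (((pre ++ [l]).length : Nat) : Int) := by
      simp
    have hlist : pre ++ l :: rest = (pre ++ [l]) ++ rest := by simp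
    rw [hlen, hlist, ih (pre ++ [l]) (pvStepA ((pre ++ [l]) ++ rest) acc ((pre.length : Int), l))]
    rw [← hlist, pvStepA_eq pre l rest acc, pvPb_concat]
    simp [pvS]

theorem pvA_eq_S (lines : List String) : clean_stray_fragments lines = pvS true lines := by
  have h := pvA_fold lines [] []
  simpa [clean_stray_fragments, pvPb] using h

-- value of pvGo for an arbitrary pending run
def pvPhi : List String → List String → List String
  | [], suf => pvS true suf
  | [l], suf => (if pvFrag l && pvNb suf then [] else [l]) ++ pvS false suf
  | run, suf => run ++ pvS false suf

theorem pvGo_eq_phi (suf : List String) : ∀ (run : List String), pvGo run suf = pvPhi run suf := by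
  induction suf with
  | nil =>
    intro run
    match run with
    | [] => simp [pvGo, pvPhi, pvFlush, pvS]
    | [l] => simp [pvGo, pvPhi, pvFlush, pvNb, pvS]
    | a :: b :: t => simp [pvGo, pvPhi, pvFlush, pvS]
  | cons l rest ih =>
    intro run
    by_cases hb : PySem.Str.strip l = ""
    · have hfrag := pvFrag_of_blank l hb
      match run with
      | [] =>
        simp [pvGo, hb, ih, pvPhi, pvFlush, pvS, pvNb, hfrag]
      | [q] =>
        simp [pvGo, hb, ih, pvPhi, pvFlush, pvS, pvNb, hfrag]
      | a :: b :: t =>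
        simp [pvGo, hb, ih, pvPhi, pvFlush, pvS, pvNb, hfrag]
    · have hb' : (PySem.Str.strip l == "") = false := by simp [hb]
      match run with
      | [] =>
        rw [show pvGo [] (l :: rest) = pvGo ([] ++ [l]) rest by simp [pvGo, hb'], ih]
        simp [pvPhi, pvS, pvNb, hb']
      | [q] =>
        rw [show pvGo [q] (l :: rest) = pvGo ([q] ++ [l]) rest by simp [pvGo, hb'], ih]
        simp [pvPhi, pvS, pvNb, hb']
      | a :: b :: t =>
        rw [show pvGo (a :: b :: t) (l :: rest) = pvGo ((a :: b :: t) ++ [l]) rest by simp [pvGo, hb'], ih]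
        simp [pvPhi, pvS, pvNb, hb']

theorem pvB_eq_S (lines : List String) : clean_stray_fragments_alt lines = pvS true lines := by
  rw [clean_stray_fragments_alt, pvGo_eq_phi]
  rfl

-- ===== VERDICT (by name: the statement is the Claim_ definition above) =====
theorem clean_stray_fragments_spec : Claim_equal_clean_stray_fragments := by
  intro lines _
  unfold Spec_clean_stray_fragments
  rw [pvA_eq_S, pvB_eq_S]
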